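-- pv_equiv track=rewrite | github.com/simpliqc9-ops/Yoshins-Arcade-GFX-Stitcher | Yoshins ARCADE GFX Stitcher.py | de_convert_SCR3
-- ===== SOURCE A (Python) =====
-- def de_convert_SCR3(table):#,x,y):
--     temp = table
--     out2 = []
--     tiles = []
--     ev_strips = []
--     od_strips = []
--     length = 0x80
--     for i in range(0,len(temp),0x1000):
--         for tx in range(0,8,1):
--             for ty in range(0,4,1):
--                 start = i + (tx*length)+(ty*0x400)
--                 end = start + length
--                 tiles += temp[start:end]
--     for i in range(0,len(tiles),0x80):
--         ev_strips += tiles[i:i+0x40]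
--         od_strips += tiles[i+0x40:i+0x80]
--
--     for i in range(0,len(ev_strips),0x04):
--         out2 += ev_strips[i:i+0x04]
--         out2 += od_strips[i:i+0x04]
--     return out2
-- ===== SOURCE B (Python) =====
-- def de_convert_SCR3(table):
--     # Per-block processing: each 0x1000 block is independent; the strip
--     # split (pass 2) and 4-byte interleave (pass 3) are fused into one
--     # local pass over the block's tile data, so the global ev_strips /
--     # od_strips intermediate lists disappear.
--     out = []
--     for base in range(0, len(table), 0x1000):
--         tb = []
--         for tx in range(8):
--             for ty in range(4):
--                 s = base + tx * 0x80 + ty * 0x400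
--                 tb += table[s:s + 0x80]
--         for i in range(0, len(tb), 0x80):
--             for j in range(i, i + 0x40, 4):
--                 out += tb[j:j + 4]
--                 out += tb[j + 0x40:j + 0x44]
--     return out
-- ===== Notes on version B (the rewrite author's own statement) =====
-- stated objective: alternative
-- what changed: A's three sequential global passes (tile gather, ev/od strip split, 4-byte interleave) with two full-size intermediate lists are replaced by independent per-0x1000-block processing that fuses the strip split and the interleave into one local pass, eliminating the ev_strips/od_strips lists.
import Mathlib
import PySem

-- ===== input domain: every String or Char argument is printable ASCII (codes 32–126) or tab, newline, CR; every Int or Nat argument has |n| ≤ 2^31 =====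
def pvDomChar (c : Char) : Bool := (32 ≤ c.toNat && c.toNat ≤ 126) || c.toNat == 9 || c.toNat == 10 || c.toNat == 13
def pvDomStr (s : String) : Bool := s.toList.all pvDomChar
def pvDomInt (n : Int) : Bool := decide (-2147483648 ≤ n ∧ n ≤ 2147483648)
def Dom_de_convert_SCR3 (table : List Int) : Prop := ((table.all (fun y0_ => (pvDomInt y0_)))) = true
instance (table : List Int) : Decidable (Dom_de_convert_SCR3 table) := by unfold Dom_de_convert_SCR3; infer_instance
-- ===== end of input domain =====

-- B replaces A's three sequential global passes (with the ev_strips/od_strips intermediate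
-- lists) by independent per-0x1000-block processing that fuses the strip split and the
-- 4-byte interleave into one local pass; same O(n) cost, different decomposition.

-- ===== PORT A =====
def de_convert_SCR3 (table : List Int) : List Int :=
  let temp := table
  let out2 : List Int := []
  let tiles : List Int := []
  let ev_strips : List Int := []
  let od_strips : List Int := []
  let length : Int := 0x80
  let tiles := (PySem.List.pyRange 0 (PySem.List.len temp) 0x1000).foldl (fun tiles i =>
    (PySem.List.pyRange 0 8 1).foldl (fun tiles tx =>
      (PySem.List.pyRange 0 4 1).foldl (fun tiles ty =>
        let start := i + (tx * length) + (ty * 0x400)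
        let «end» := start + length
        tiles ++ PySem.List.slice temp (some start) (some «end»)) tiles) tiles) tiles
  let (ev_strips, od_strips) := (PySem.List.pyRange 0 (PySem.List.len tiles) 0x80).foldl
    (fun (p : List Int × List Int) i =>
      (p.1 ++ PySem.List.slice tiles (some i) (some (i + 0x40)),
       p.2 ++ PySem.List.slice tiles (some (i + 0x40)) (some (i + 0x80)))) (ev_strips, od_strips)
  let out2 := (PySem.List.pyRange 0 (PySem.List.len ev_strips) 0x04).foldl (fun out2 i =>
    let out2 := out2 ++ PySem.List.slice ev_strips (some i) (some (i + 0x04))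
    out2 ++ PySem.List.slice od_strips (some i) (some (i + 0x04))) out2
  out2

def de_convert_SCR3_alt (table : List Int) : List Int :=
  (PySem.List.pyRange 0 (PySem.List.len table) 0x1000).foldl (fun out base =>
    let tb := (PySem.List.pyRange 0 8 1).foldl (fun tb tx =>
      (PySem.List.pyRange 0 4 1).foldl (fun tb ty =>
        let s := base + tx * 0x80 + ty * 0x400
        tb ++ PySem.List.slice table (some s) (some (s + 0x80))) tb) []
    (PySem.List.pyRange 0 (PySem.List.len tb) 0x80).foldl (fun out i =>
      (PySem.List.pyRange i (i + 0x40) 4).foldl (fun out j =>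
        let out := out ++ PySem.List.slice tb (some j) (some (j + 4))
        out ++ PySem.List.slice tb (some (j + 0x40)) (some (j + 0x44))) out) out) []

-- ===== PRECONDITION & SPEC =====
def Spec_de_convert_SCR3 (table : List Int) (out : List Int) : Prop := out = de_convert_SCR3_alt table
instance (table : List Int) (out : List Int) : Decidable (Spec_de_convert_SCR3 table out) := by unfold Spec_de_convert_SCR3; infer_instance

-- ===== CLAIM =====
def Claim_equal_de_convert_SCR3 : Prop := ∀ (table : List Int), Dom_de_convert_SCR3 table → Spec_de_convert_SCR3 table (de_convert_SCR3 table)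

-- ===== LEMMAS AND PROOFS =====
def cdivN (m s : Nat) : Nat := (m + s - 1) / s

lemma pyRange_step_nat (n s : Nat) (hs : 0 < s) :
    PySem.List.pyRange 0 (n : Int) (s : Int) =
      (List.range (cdivN n s)).map (fun k => ((s * k : Nat) : Int)) := by
  rw [PySem.List.pyRange_of_pos _ _ (by exact_mod_cast hs)]
  have hcount : (if (0:Int) < (n:Int) then (((n:Int) - 0 + (s:Int) - 1) / (s:Int)).toNat else 0) = cdivN n s := by
    rcases Nat.eq_zero_or_pos n with h | h
    · subst h; simp [cdivN, Nat.div_eq_of_lt, hs]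
    · rw [if_pos (by exact_mod_cast h)]
      have : ((n:Int) - 0 + (s:Int) - 1) = ((n + s - 1 : Nat) : Int) := by
        push_cast [Nat.cast_sub (by omega : 1 ≤ n + s)]; ring
      rw [this, ← Int.natCast_div, Int.toNat_natCast, cdivN]
  rw [hcount]
  exact List.map_congr_left (fun k _ => by push_cast; ring)

lemma pyRange_i64 (a : Int) :
    PySem.List.pyRange a (a + 0x40) 4 = (List.range 16).map (fun j : Nat => a + 4 * (j : Int)) := by
  rw [PySem.List.pyRange_of_pos _ _ (by norm_num : (0:Int) < 4),
      if_pos (by omega : a < a + 0x40)]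
  have h67 : (a + 0x40 - a + 4 - 1) = (67:Int) := by ring
  rw [h67]
  rfl

lemma slice_nat {α : Type} (t : List α) (a b : Int) (j c : Nat)
    (ha : a = (j : Int)) (hb : b = (j : Int) + (c : Int)) :
    PySem.List.slice t (some a) (some b) = (t.drop j).take c := by
  subst ha; subst hb; exact PySem.List.slice_natCast_add t j c

-- ===== normal forms =====
def blockT (t : List Int) (b : Nat) : List Int :=
  (List.range 8).flatMap (fun tx => (List.range 4).flatMap (fun ty =>
    ((t.drop (0x1000 * b + 0x80 * tx + 0x400 * ty)).take 0x80)))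

def tilesF (t : List Int) : List Int :=
  (List.range (cdivN t.length 0x1000)).flatMap (blockT t)

def evF (l : List Int) : List Int :=
  (List.range (cdivN l.length 0x80)).flatMap (fun k => (l.drop (0x80 * k)).take 0x40)

def odF (l : List Int) : List Int :=
  (List.range (cdivN l.length 0x80)).flatMap (fun k => (l.drop (0x80 * k + 0x40)).take 0x40)

def p3F (ev od : List Int) : List Int :=
  (List.range (cdivN ev.length 4)).flatMap (fun k => (ev.drop (4 * k)).take 4 ++ (od.drop (4 * k)).take 4)

def pF (l : List Int) : List Int := p3F (evF l) (odF l)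

def qF (l : List Int) : List Int :=
  (List.range (cdivN l.length 0x80)).flatMap (fun k =>
    (List.range 16).flatMap (fun j =>
      (l.drop (0x80 * k + 4 * j)).take 4 ++ (l.drop (0x80 * k + 0x40 + 4 * j)).take 4))

lemma flatMap_congr_fun {α β : Type} (l : List α) {f g : α → List β} (h : ∀ a, f a = g a) :
    l.flatMap f = l.flatMap g := by
  exact List.flatMap_congr (fun a _ => h a)

-- tiles loop of A normalizes to tilesF
lemma tiles_norm (t : List Int) :
    ((PySem.List.pyRange 0 (t.length : Int) 0x1000).foldl (fun tiles i =>
      (PySem.List.pyRange 0 8 1).foldl (fun tiles tx =>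
        (PySem.List.pyRange 0 4 1).foldl (fun tiles ty =>
          tiles ++ PySem.List.slice t (some (i + tx * 0x80 + ty * 0x400))
            (some (i + tx * 0x80 + ty * 0x400 + 0x80))) tiles) tiles) ([] : List Int))
    = tilesF t := by
  simp only [PySem.List.foldl_append_eq_flatMap]
  have h1 := pyRange_step_nat t.length 4096 (by norm_num)
  norm_num at h1
  rw [h1, PySem.List.pyRange_one, PySem.List.pyRange_one]
  simp only [List.flatMap_map, List.nil_append, sub_zero, zero_add]
  unfold tilesF blockT
  refine flatMap_congr_fun _ (fun b => ?_)
  refine flatMap_congr_fun _ (fun tx => ?_)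
  refine flatMap_congr_fun _ (fun ty => ?_)
  exact slice_nat t _ _ (4096 * b + 128 * tx + 1024 * ty) 128
    (by push_cast; ring) (by push_cast; ring)


lemma ev_norm (l : List Int) :
    (([] : List Int) ++ (PySem.List.pyRange 0 (l.length : Int) 0x80).flatMap
      (fun i => PySem.List.slice l (some i) (some (i + 0x40)))) = evF l := by
  have h1 := pyRange_step_nat l.length 128 (by norm_num)
  norm_num at h1
  rw [List.nil_append, h1, List.flatMap_map]
  unfold evF
  refine flatMap_congr_fun _ (fun k => ?_)
  exact slice_nat l _ _ (128 * k) 64 (by push_cast; ring) (by push_cast; ring)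

lemma od_norm (l : List Int) :
    (([] : List Int) ++ (PySem.List.pyRange 0 (l.length : Int) 0x80).flatMap
      (fun i => PySem.List.slice l (some (i + 0x40)) (some (i + 0x80)))) = odF l := by
  have h1 := pyRange_step_nat l.length 128 (by norm_num)
  norm_num at h1
  rw [List.nil_append, h1, List.flatMap_map]
  unfold odF
  refine flatMap_congr_fun _ (fun k => ?_)
  exact slice_nat l _ _ (128 * k + 64) 64 (by push_cast; ring) (by push_cast; ring)

lemma p3_norm (ev od : List Int) :
    ((PySem.List.pyRange 0 (ev.length : Int) 0x04).foldl
      (fun out2 i => out2 ++ PySem.List.slice ev (some i) (some (i + 0x04)) ++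
                PySem.List.slice od (some i) (some (i + 0x04))) ([] : List Int)) = p3F ev od := by
  simp only [List.append_assoc, PySem.List.foldl_append_eq_flatMap]
  have h1 := pyRange_step_nat ev.length 4 (by norm_num)
  norm_num at h1
  rw [List.nil_append, h1, List.flatMap_map]
  unfold p3F
  refine flatMap_congr_fun _ (fun k => ?_)
  rw [slice_nat ev _ _ (4 * k) 4 (by push_cast; ring) (by push_cast; ring),
      slice_nat od _ _ (4 * k) 4 (by push_cast; ring) (by push_cast; ring)]

theorem A_norm (t : List Int) : de_convert_SCR3 t = pF (tilesF t) := by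
  simp only [de_convert_SCR3, PySem.List.len_eq]
  rw [tiles_norm]
  rw [PySem.List.foldl_prod_mk
    (f := fun acc (i : Int) => acc ++ PySem.List.slice (tilesF t) (some i) (some (i + 0x40)))
    (g := fun acc (i : Int) => acc ++ PySem.List.slice (tilesF t) (some (i + 0x40)) (some (i + 0x80)))]
  simp only [PySem.List.foldl_append_eq_flatMap]
  rw [ev_norm, od_norm, p3_norm]
  rfl

lemma tb_norm (t : List Int) (b : Nat) :
    (([] : List Int) ++ (PySem.List.pyRange 0 8 1).flatMap (fun tx =>
      (PySem.List.pyRange 0 4 1).flatMap (fun ty =>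
        PySem.List.slice t (some (0x1000 * (b : Int) + tx * 0x80 + ty * 0x400))
          (some (0x1000 * (b : Int) + tx * 0x80 + ty * 0x400 + 0x80)))))
      = blockT t b := by
  rw [PySem.List.pyRange_one, PySem.List.pyRange_one]
  simp only [List.flatMap_map, List.nil_append, sub_zero, zero_add]
  unfold blockT
  refine flatMap_congr_fun _ (fun tx => ?_)
  refine flatMap_congr_fun _ (fun ty => ?_)
  exact slice_nat t _ _ (4096 * b + 128 * tx + 1024 * ty) 128
    (by push_cast; ring) (by push_cast; ring)

theorem B_norm (t : List Int) :
    de_convert_SCR3_alt t = (List.range (cdivN t.length 0x1000)).flatMap (fun b => qF (blockT t b)) := by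
  simp only [de_convert_SCR3_alt, PySem.List.len_eq, List.append_assoc,
    PySem.List.foldl_append_eq_flatMap]
  have h1 := pyRange_step_nat t.length 4096 (by norm_num)
  norm_num at h1
  rw [h1, List.flatMap_map, List.nil_append]
  refine flatMap_congr_fun _ (fun b => ?_)
  rw [tb_norm t b]
  have h2 := pyRange_step_nat (blockT t b).length 128 (by norm_num)
  norm_num at h2
  rw [h2, List.flatMap_map]
  unfold qF
  refine flatMap_congr_fun _ (fun k => ?_)
  rw [pyRange_i64]
  simp only [List.flatMap_map]
  refine flatMap_congr_fun _ (fun j => ?_)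
  rw [slice_nat (blockT t b) _ _ (128 * k + 4 * j) 4 (by push_cast; ring) (by push_cast; ring),
      slice_nat (blockT t b) _ _ (128 * k + 4 * j + 64) 4 (by push_cast; ring) (by push_cast; ring)]
  ring_nf

-- locality helpers
lemma take_drop_append_left {α : Type} (l1 l2 : List α) (m c : Nat) (h : m + c ≤ l1.length) :
    ((l1 ++ l2).drop m).take c = (l1.drop m).take c := by
  rw [List.drop_append, List.take_append_of_le_length (by simp; omega)]

lemma take_drop_append_right {α : Type} (l1 l2 : List α) (m : Nat) (h : l1.length ≤ m) :
    (l1 ++ l2).drop m = l2.drop (m - l1.length) := by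
  conv_lhs => rw [show m = l1.length + (m - l1.length) by omega, List.drop_length_add_append]

lemma cdivN_mul_add (s d m : Nat) (hs : 0 < s) : cdivN (s * d + m) s = d + cdivN m s := by
  unfold cdivN
  have h1 : s * d + m + s - 1 = s * d + (m + s - 1) := by omega
  rw [h1, Nat.mul_add_div hs]

lemma qF_split (l1 l2 : List Int) (h : 0x80 ∣ l1.length) : qF (l1 ++ l2) = qF l1 ++ qF l2 := by
  obtain ⟨d, hd⟩ := h
  unfold qF
  have hcd : cdivN (0x80 * d) 0x80 = d := by unfold cdivN; omega
  rw [List.length_append, hd, cdivN_mul_add 128 d l2.length (by norm_num),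
      List.range_add, List.flatMap_append, List.flatMap_map, hcd]
  congr 1
  · refine List.flatMap_congr (fun k hk => ?_)
    have hk' : k < d := List.mem_range.mp hk
    refine List.flatMap_congr (fun j hj => ?_)
    have hj' : j < 16 := List.mem_range.mp hj
    rw [take_drop_append_left l1 l2 _ 4 (by omega),
        take_drop_append_left l1 l2 _ 4 (by omega)]
  · refine List.flatMap_congr (fun k _ => ?_)
    refine List.flatMap_congr (fun j _ => ?_)
    rw [take_drop_append_right l1 l2 (0x80 * (d + k) + 4 * j) (by omega),
        take_drop_append_right l1 l2 (0x80 * (d + k) + 0x40 + 4 * j) (by omega)]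
    have e1 : 0x80 * (d + k) + 4 * j - l1.length = 0x80 * k + 4 * j := by omega
    have e2 : 0x80 * (d + k) + 0x40 + 4 * j - l1.length = 0x80 * k + 0x40 + 4 * j := by omega
    rw [e1, e2]

lemma blockT_len (t : List Int) (b : Nat) (h : 0x1000 * (b + 1) ≤ t.length) :
    (blockT t b).length = 0x1000 := by
  unfold blockT
  rw [List.length_flatMap]
  have h1 : ∀ tx ∈ List.range 8,
      ((List.range 4).flatMap (fun ty =>
        (t.drop (0x1000 * b + 0x80 * tx + 0x400 * ty)).take 0x80)).length = 512 := by
    intro tx htx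
    have htx' : tx < 8 := List.mem_range.mp htx
    rw [List.length_flatMap]
    have h2 : ∀ ty ∈ List.range 4,
        ((t.drop (0x1000 * b + 0x80 * tx + 0x400 * ty)).take 0x80).length = 128 := by
      intro ty hty
      have hty' : ty < 4 := List.mem_range.mp hty
      rw [List.length_take, List.length_drop]
      omega
    rw [List.map_congr_left h2]
    rfl
  rw [List.map_congr_left (fun tx htx => by rw [h1 tx htx])]
  rfl

lemma qF_blocks (t : List Int) : ∀ (B c : Nat), c + B = cdivN t.length 0x1000 →
    qF ((List.range B).flatMap (fun b => blockT t (c + b)))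
      = (List.range B).flatMap (fun b => qF (blockT t (c + b))) := by
  intro B
  induction B with
  | zero => intro c _; simp [qF, cdivN]
  | succ B ih =>
    intro c hc
    rw [List.range_succ_eq_map]
    simp only [List.flatMap_cons, List.flatMap_map, Nat.succ_eq_add_one]
    cases B with
    | zero => simp
    | succ B' =>
      have hfull : 0x1000 * (c + 1) ≤ t.length := by
        unfold cdivN at hc; omega
      have hsplit := qF_split (blockT t (c + 0))
        ((List.range (B' + 1)).flatMap (fun b => blockT t (c + (b + 1))))
        (by rw [blockT_len t (c + 0) (by omega)]; exact ⟨32, rfl⟩)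
      rw [hsplit]
      congr 1
      have := ih (c + 1) (by omega)
      calc qF ((List.range (B' + 1)).flatMap fun b => blockT t (c + (b + 1)))
          = qF ((List.range (B' + 1)).flatMap fun b => blockT t (c + 1 + b)) := by
            congr 1; exact List.flatMap_congr (fun x _ => by ring_nf)
        _ = (List.range (B' + 1)).flatMap fun b => qF (blockT t (c + 1 + b)) := this
        _ = (List.range (B' + 1)).flatMap fun b => qF (blockT t (c + (b + 1))) := by
            exact List.flatMap_congr (fun x _ => by ring_nf)

lemma qF_tilesF (t : List Int) :
    qF (tilesF t) = (List.range (cdivN t.length 0x1000)).flatMap (fun b => qF (blockT t b)) := by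
  have h := qF_blocks t (cdivN t.length 0x1000) 0 (by omega)
  simpa using h

lemma evF_split (l1 l2 : List Int) (h : 0x80 ∣ l1.length) : evF (l1 ++ l2) = evF l1 ++ evF l2 := by
  obtain ⟨d, hd⟩ := h
  unfold evF
  have hcd : cdivN (0x80 * d) 0x80 = d := by unfold cdivN; omega
  rw [List.length_append, hd, cdivN_mul_add 128 d l2.length (by norm_num),
      List.range_add, List.flatMap_append, List.flatMap_map, hcd]
  congr 1
  · refine List.flatMap_congr (fun k hk => ?_)
    have hk' : k < d := List.mem_range.mp hk
    rw [take_drop_append_left l1 l2 _ 0x40 (by omega)]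
  · refine List.flatMap_congr (fun k _ => ?_)
    rw [take_drop_append_right l1 l2 (0x80 * (d + k)) (by omega)]
    congr 2
    omega

lemma odF_split (l1 l2 : List Int) (h : 0x80 ∣ l1.length) : odF (l1 ++ l2) = odF l1 ++ odF l2 := by
  obtain ⟨d, hd⟩ := h
  unfold odF
  have hcd : cdivN (0x80 * d) 0x80 = d := by unfold cdivN; omega
  rw [List.length_append, hd, cdivN_mul_add 128 d l2.length (by norm_num),
      List.range_add, List.flatMap_append, List.flatMap_map, hcd]
  congr 1
  · refine List.flatMap_congr (fun k hk => ?_)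
    have hk' : k < d := List.mem_range.mp hk
    rw [take_drop_append_left l1 l2 _ 0x40 (by omega)]
  · refine List.flatMap_congr (fun k _ => ?_)
    rw [take_drop_append_right l1 l2 (0x80 * (d + k) + 0x40) (by omega)]
    congr 2
    omega

lemma p3F_split (e1 o1 e2 o2 : List Int) (he : 4 ∣ e1.length) (heo : e1.length = o1.length) :
    p3F (e1 ++ e2) (o1 ++ o2) = p3F e1 o1 ++ p3F e2 o2 := by
  obtain ⟨d, hd⟩ := he
  unfold p3F
  have hcd : cdivN (4 * d) 4 = d := by unfold cdivN; omega
  rw [List.length_append, hd, cdivN_mul_add 4 d e2.length (by norm_num),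
      List.range_add, List.flatMap_append, List.flatMap_map, hcd]
  congr 1
  · refine List.flatMap_congr (fun k hk => ?_)
    have hk' : k < d := List.mem_range.mp hk
    rw [take_drop_append_left e1 e2 _ 4 (by omega),
        take_drop_append_left o1 o2 _ 4 (by omega)]
  · refine List.flatMap_congr (fun k _ => ?_)
    rw [take_drop_append_right e1 e2 (4 * (d + k)) (by omega),
        take_drop_append_right o1 o2 (4 * (d + k)) (by omega)]
    have e1' : 4 * (d + k) - e1.length = 4 * k := by omega
    have e2' : 4 * (d + k) - o1.length = 4 * k := by omega
    rw [e1', e2']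

lemma evF_small (c : List Int) (h0 : 0 < c.length) (h1 : c.length ≤ 0x80) :
    evF c = c.take 0x40 := by
  unfold evF
  have : cdivN c.length 0x80 = 1 := by unfold cdivN; omega
  rw [this, List.range_one]
  simp

lemma odF_small (c : List Int) (h0 : 0 < c.length) (h1 : c.length ≤ 0x80) :
    odF c = c.drop 0x40 := by
  unfold odF
  have : cdivN c.length 0x80 = 1 := by unfold cdivN; omega
  rw [this, List.range_one]
  simp [List.take_of_length_le (by simp; omega : (c.drop 0x40).length ≤ 0x40)]

lemma pq_small (l : List Int) (h : l.length ≤ 0x80) : pF l = qF l := by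
  rcases Nat.eq_zero_or_pos l.length with h0 | h0
  · have : l = [] := List.length_eq_zero_iff.mp h0
    subst this
    rfl
  · unfold pF p3F qF
    rw [evF_small l h0 h, odF_small l h0 h]
    have hq1 : cdivN l.length 0x80 = 1 := by unfold cdivN; omega
    rw [hq1, List.range_one]
    simp only [List.flatMap_cons, List.flatMap_nil, List.append_nil, Nat.mul_zero,
      Nat.zero_add]
    -- both sides are flatMaps of the same function over range K / range 16
    have hlen : (l.take 0x40).length = min 0x40 l.length := by simp
    set K := cdivN (l.take 0x40).length 4 with hK
    have hK16 : K ≤ 16 := by rw [hK, hlen]; unfold cdivN; omega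
    have hterm : ∀ k ∈ List.range K,
        ((l.take 0x40).drop (4 * k)).take 4 ++ ((l.drop 0x40).drop (4 * k)).take 4
          = (l.drop (4 * k)).take 4 ++ (l.drop (0x40 + 4 * k)).take 4 := by
      intro k hk
      have hk' : k < K := List.mem_range.mp hk
      have hk16 : k < 16 := by omega
      rw [List.drop_take, List.take_take, List.drop_drop]
      congr 1
      congr 1
      omega
    rw [List.flatMap_congr hterm]
    have hsplit16 : List.range 16 = List.range K ++ (List.range (16 - K)).map (fun x => K + x) := by
      rw [← List.range_add]; congr 1; omega
    rw [hsplit16, List.flatMap_append, List.flatMap_map]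
    have hnil : ((List.range (16 - K)).flatMap (fun x =>
        (l.drop (4 * (K + x))).take 4 ++ (l.drop (0x40 + 4 * (K + x))).take 4)) = [] := by
      refine List.flatMap_eq_nil_iff.mpr (fun x hx => ?_)
      have hx' : x < 16 - K := List.mem_range.mp hx
      have hKdef : K = cdivN (min 0x40 l.length) 4 := by rw [hK, hlen]
      unfold cdivN at hKdef
      have h4K : l.length ≤ 4 * K := by omega
      rw [List.drop_eq_nil_of_le (by omega), List.drop_eq_nil_of_le (by omega)]
      rfl
    rw [hnil, List.append_nil]

lemma pF_chunk (c rest : List Int) (hc : c.length = 0x80) :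
    pF (c ++ rest) = pF c ++ pF rest := by
  unfold pF
  rw [evF_split c rest (by rw [hc]), odF_split c rest (by rw [hc])]
  have he : (evF c).length = 0x40 := by
    rw [evF_small c (by omega) (by omega)]; simp [hc]
  have ho : (odF c).length = 0x40 := by
    rw [odF_small c (by omega) (by omega)]; simp [hc]
  exact p3F_split _ _ _ _ (by rw [he]; exact ⟨16, rfl⟩) (by rw [he, ho])

lemma pq (l : List Int) : pF l = qF l := by
  have main : ∀ (n : Nat) (l : List Int), l.length ≤ n → pF l = qF l := by
    intro n
    induction n with
    | zero => intro l hl; exact pq_small l (by omega)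
    | succ n ih =>
      intro l hl
      by_cases h : l.length ≤ 0x80
      · exact pq_small l h
      · have hsplit : l = l.take 0x80 ++ l.drop 0x80 := (List.take_append_drop 0x80 l).symm
        have hct : (l.take 0x80).length = 0x80 := by simp; omega
        calc pF l = pF (l.take 0x80 ++ l.drop 0x80) := by rw [← hsplit]
          _ = pF (l.take 0x80) ++ pF (l.drop 0x80) := pF_chunk _ _ hct
          _ = qF (l.take 0x80) ++ qF (l.drop 0x80) := by
              rw [pq_small _ (by omega), ih (l.drop 0x80) (by simp; omega)]
          _ = qF (l.take 0x80 ++ l.drop 0x80) := (qF_split _ _ (by rw [hct])).symm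
          _ = qF l := by rw [← hsplit]
  exact main l.length l le_rfl

theorem ab_eq (t : List Int) : de_convert_SCR3 t = de_convert_SCR3_alt t := by
  rw [A_norm, B_norm, pq]
  exact qF_tilesF t

-- ===== VERDICT =====
theorem de_convert_SCR3_spec : Claim_equal_de_convert_SCR3 := by
  intro table _
  exact ab_eq table
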